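-- pv_equiv track=rewrite | github.com/hebelmx/Veriqan | Prisma/scripts/archive/xunit-old-versions/fix_xunit1026_corrected.py | ensure_proper_using_shouldly
-- ===== SOURCE A (Python) =====
-- def ensure_proper_using_shouldly(content: str) -> str:
--     """Add using Shouldly in the correct location if missing."""
--     if 'using Shouldly;' not in content:
--         lines = content.split('\n')
--
--         # Find the correct insertion point - after other using statements, before namespace
--         insert_point = 0
--         namespace_line = -1
--         last_using_line = -1
--
--         for i, line in enumerate(lines):
--             stripped_line = line.strip()
--             if stripped_line.startswith('using ') and not stripped_line.startswith('using namespace'):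
--                 last_using_line = i
--             elif stripped_line.startswith('namespace'):
--                 namespace_line = i
--                 break
--
--         if last_using_line >= 0:
--             # Insert after last using statement
--             insert_point = last_using_line + 1
--         elif namespace_line >= 0:
--             # Insert before namespace with blank line
--             insert_point = namespace_line
--             lines.insert(insert_point, '')
--             insert_point += 1
--
--         lines.insert(insert_point, 'using Shouldly;')
--         return '\n'.join(lines)
--     return content
-- ===== SOURCE B (Python) =====
-- def ensure_proper_using_shouldly(content: str) -> str:
--     """Add using Shouldly in the correct location if missing."""
--     if 'using Shouldly;' in content:
--         return content
--     lines = content.split('\n')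
--     # Partition the lines at the first namespace line (tail starts there).
--     prefix, tail, ns_seen = [], [], False
--     for line in lines:
--         if not ns_seen and line.strip().startswith('namespace'):
--             ns_seen = True
--         (tail if ns_seen else prefix).append(line)
--     # Walk the prefix BACKWARDS: place the marker just before the first using
--     # line met (i.e. right after the last using line of the prefix).
--     head_rev, inserted = [], False
--     for line in reversed(prefix):
--         if not inserted:
--             s = line.strip()
--             if s.startswith('using ') and not s.startswith('using namespace'):
--                 head_rev.append('using Shouldly;')
--                 inserted = True
--         head_rev.append(line)
--     head = head_rev[::-1]
--     if not inserted:
--         head = head + ['', 'using Shouldly;'] if ns_seen else ['using Shouldly;'] + head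
--     return '\n'.join(head + tail)
-- ===== Notes on version B (the rewrite author's own statement) =====
-- stated objective: alternative
-- what changed: A makes one forward index scan carrying three mutable Int sentinels and calls list.insert at a computed index; B never computes an index: it partitions the lines at the first namespace line, then walks the prefix BACKWARDS placing the marker immediately before the first using line it meets (i.e. after the last one), with the fallbacks expressed as list concatenations.
import Mathlib
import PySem

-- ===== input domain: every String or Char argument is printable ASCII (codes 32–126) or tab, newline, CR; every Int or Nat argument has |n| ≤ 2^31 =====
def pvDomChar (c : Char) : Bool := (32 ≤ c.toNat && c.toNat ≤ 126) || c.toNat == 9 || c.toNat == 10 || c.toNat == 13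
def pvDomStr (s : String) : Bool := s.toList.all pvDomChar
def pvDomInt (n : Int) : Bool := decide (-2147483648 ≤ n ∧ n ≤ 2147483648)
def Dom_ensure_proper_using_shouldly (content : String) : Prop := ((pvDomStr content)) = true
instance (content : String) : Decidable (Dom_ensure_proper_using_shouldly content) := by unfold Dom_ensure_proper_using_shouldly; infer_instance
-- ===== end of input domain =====

-- B replaces A's forward index scan (three mutable Int sentinels + list.insert) by an
-- index-free partition at the first namespace line followed by a BACKWARD walk over the
-- prefix that drops the marker in before the first using line it meets: alternative decomposition.

-- shared stripped-line tests, transliterating the pythons' `line.strip().startswith(...)` checks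
def pvU (l : String) : Bool :=
  PySem.Str.startswith (PySem.Str.strip l) "using "
    && !(PySem.Str.startswith (PySem.Str.strip l) "using namespace")
def pvP (l : String) : Bool := PySem.Str.startswith (PySem.Str.strip l) "namespace"

-- ===== PORT A =====
-- A's scan loop: carries i, last_using_line, namespace_line; breaks on the first namespace line.
def pvScanA : List String → Int → Int → Int → Int × Int
  | [], _, lu, ns => (lu, ns)
  | line :: rest, i, lu, ns =>
    if pvU line then pvScanA rest (i + 1) i ns
    else if pvP line then (lu, i)  -- break
    else pvScanA rest (i + 1) lu ns

def ensure_proper_using_shouldly (content : String) : String :=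
  if !(PySem.Str.isIn "using Shouldly;" content) then
    let lines := (PySem.Str.split? content "\n").getD []
    let r := pvScanA lines 0 (-1) (-1)
    if r.1 ≥ 0 then
      PySem.Str.join "\n" (PySem.List.insert lines (r.1 + 1) "using Shouldly;")
    else if r.2 ≥ 0 then
      let lines2 := PySem.List.insert lines r.2 ""
      PySem.Str.join "\n" (PySem.List.insert lines2 (r.2 + 1) "using Shouldly;")
    else
      PySem.Str.join "\n" (PySem.List.insert lines 0 "using Shouldly;")
  else content

-- ===== PORT B =====
-- Source B's partition loop: python-list appends are modelled by cons accumulators reversed at the end.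
def pvSplitLoop : List String → List String → List String → Bool → List String × List String × Bool
  | [], preRev, tlRev, ns => (preRev.reverse, tlRev.reverse, ns)
  | line :: rest, preRev, tlRev, ns =>
    let ns' := if !ns && pvP line then true else ns
    if ns' then pvSplitLoop rest preRev (line :: tlRev) ns'
    else pvSplitLoop rest (line :: preRev) tlRev ns'

-- Source B's backward walk over reversed(prefix); acc is head_rev already re-reversed
-- (python appends to head_rev and reverses at the end; cons-accumulation is the same list).
def pvRevLoop : List String → List String → Bool → List String × Bool
  | [], acc, ins => (acc, ins)
  | line :: rest, acc, ins =>
    if !ins then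
      if pvU line then pvRevLoop rest (line :: "using Shouldly;" :: acc) true
      else pvRevLoop rest (line :: acc) ins
    else pvRevLoop rest (line :: acc) ins

def ensure_proper_using_shouldly_alt (content : String) : String :=
  if PySem.Str.isIn "using Shouldly;" content then content
  else
    let lines := (PySem.Str.split? content "\n").getD []
    let r := pvSplitLoop lines [] [] false
    let hr := pvRevLoop r.1.reverse [] false
    let head :=
      if hr.2 then hr.1
      else if r.2.2 then hr.1 ++ ["", "using Shouldly;"]
      else "using Shouldly;" :: hr.1
    PySem.Str.join "\n" (head ++ r.2.1)

-- ===== PRECONDITION & SPEC =====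
def Spec_ensure_proper_using_shouldly (content : String) (out : String) : Prop := out = ensure_proper_using_shouldly_alt content
instance (content : String) (out : String) : Decidable (Spec_ensure_proper_using_shouldly content out) := by unfold Spec_ensure_proper_using_shouldly; infer_instance

-- ===== CLAIM (what is proved, stated in full; the proofs are below) =====
def Claim_equal_ensure_proper_using_shouldly : Prop := ∀ (content : String), Dom_ensure_proper_using_shouldly content → Spec_ensure_proper_using_shouldly content (ensure_proper_using_shouldly content)

-- ===== LEMMAS AND PROOFS =====

-- ghost indices: first namespace line, last using line
def pvNsIdx : List String → Option Nat
  | [] => none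
  | l :: r => if pvP l then some 0 else (pvNsIdx r).map (· + 1)

def pvLuIdx : List String → Option Nat
  | [] => none
  | l :: r =>
    match pvLuIdx r with
    | some k => some (k + 1)
    | none => if pvU l then some 0 else none

def pvOInt : Option Nat → Int
  | none => -1
  | some k => (k : Int)

lemma pv_not_both (s : String) (h : PySem.Str.startswith s "using " = true) :
    PySem.Str.startswith s "namespace" = false := by
  simp only [PySem.Str.startswith, PySem.Chars.startswith] at h ⊢
  cases hl : s.toList with
  | nil => rw [hl] at h; simp at h
  | cons c t =>
    rw [hl] at h
    simp only [show "using ".toList = 'u'::'s'::'i'::'n'::'g'::' '::[] from rfl] at h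
    simp only [show "namespace".toList = 'n'::'a'::'m'::'e'::'s'::'p'::'a'::'c'::'e'::[] from rfl]
    simp only [List.isPrefixOf, Bool.and_eq_true, beq_iff_eq] at h
    cases h.1
    simp [List.isPrefixOf]

lemma pvUP (l : String) (h : pvU l = true) : pvP l = false := by
  unfold pvU at h
  exact pv_not_both _ ((Bool.and_eq_true _ _).mp h).1

-- A's scan in terms of the ghost indices
lemma pvScan_eq (xs : List String) (i : Nat) (acc : Option Nat) :
    pvScanA xs i (pvOInt acc) (-1) =
      (pvOInt (match pvLuIdx (xs.take ((pvNsIdx xs).getD xs.length)) with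
               | some k => some (i + k) | none => acc),
       match pvNsIdx xs with | some n => ((i + n : Nat) : Int) | none => -1) := by
  induction xs generalizing i acc with
  | nil => simp [pvScanA, pvNsIdx, pvLuIdx]
  | cons line rest ih =>
    simp only [pvScanA]
    by_cases h1 : pvU line = true
    · have hns : pvP line = false := pvUP line h1
      rw [if_pos h1]
      rw [show ((i : Int) + 1) = ((i + 1 : Nat) : Int) by push_cast; ring]
      have h := ih (i+1) (some i)
      simp only [pvOInt] at h
      rw [h]
      cases hf : pvNsIdx rest with
      | none =>
        cases hlu : pvLuIdx rest with
        | none => simp [pvNsIdx, pvLuIdx, hns, hf, hlu, h1, pvOInt]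
        | some k => simp [pvNsIdx, pvLuIdx, hns, hf, hlu, pvOInt]; ring
      | some n =>
        cases hlu : pvLuIdx (rest.take n) with
        | none => simp [pvNsIdx, pvLuIdx, hns, hf, hlu, h1, pvOInt]; ring
        | some k => simp [pvNsIdx, pvLuIdx, hns, hf, hlu, pvOInt]; constructor <;> ring
    · have hU : pvU line = false := by simpa using h1
      rw [if_neg h1]
      by_cases h2 : pvP line = true
      · rw [if_pos h2]
        simp [pvNsIdx, pvLuIdx, h2, hU, pvOInt]
      · have hP : pvP line = false := by simpa using h2
        rw [if_neg h2]
        rw [show ((i : Int) + 1) = ((i + 1 : Nat) : Int) by push_cast; ring]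
        rw [ih (i+1) acc]
        cases hf : pvNsIdx rest with
        | none =>
          cases hlu : pvLuIdx rest with
          | none => simp [pvNsIdx, pvLuIdx, hP, hf, hlu, hU, pvOInt]
          | some k => simp [pvNsIdx, pvLuIdx, hP, hf, hlu, pvOInt]; ring
        | some n =>
          cases hlu : pvLuIdx (rest.take n) with
          | none => simp [pvNsIdx, pvLuIdx, hP, hf, hlu, hU, pvOInt]; ring
          | some k => simp [pvNsIdx, pvLuIdx, hP, hf, hlu, pvOInt]; constructor <;> ring

-- bounds
lemma pvNsIdx_lt (xs : List String) (n : Nat) (h : pvNsIdx xs = some n) : n < xs.length := by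
  induction xs generalizing n with
  | nil => simp [pvNsIdx] at h
  | cons l r ih =>
    rw [pvNsIdx] at h
    split at h
    · cases h; simp
    · cases hr : pvNsIdx r with
      | none => rw [hr] at h; simp at h
      | some m => rw [hr] at h; simp at h; subst h; have := ih m hr; simp; omega

lemma pvLuIdx_none_all (xs : List String) (h : pvLuIdx xs = none) :
    xs.all (fun x => !pvU x) = true := by
  induction xs with
  | nil => simp
  | cons l r ih =>
    rw [pvLuIdx] at h
    cases hr : pvLuIdx r with
    | some k => rw [hr] at h; simp at h
    | none =>
      rw [hr] at h
      by_cases hu : pvU l = true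
      · rw [if_pos hu] at h; simp at h
      · simp only [List.all_cons, Bool.and_eq_true]
        exact ⟨by simpa using hu, ih hr⟩

lemma pvLuIdx_decomp (xs : List String) (k : Nat) (h : pvLuIdx xs = some k) :
    ∃ r1 l r2, xs = r1 ++ l :: r2 ∧ r1.length = k ∧ pvU l = true ∧
      r2.all (fun x => !pvU x) = true := by
  induction xs generalizing k with
  | nil => simp [pvLuIdx] at h
  | cons a rest ih =>
    rw [pvLuIdx] at h
    cases hr : pvLuIdx rest with
    | some k' =>
      rw [hr] at h
      have hk : k' + 1 = k := by simpa using h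
      obtain ⟨r1, l, r2, hx, hl, hu, hall⟩ := ih k' hr
      exact ⟨a :: r1, l, r2, by simp [hx], by simp [hl]; omega, hu, hall⟩
    | none =>
      rw [hr] at h
      by_cases hu : pvU a = true
      · rw [if_pos hu] at h
        have hk : k = 0 := by simpa using h.symm
        subst hk
        exact ⟨[], a, rest, rfl, rfl, hu, pvLuIdx_none_all rest hr⟩
      · rw [if_neg hu] at h; simp at h

-- split loop characterization
lemma pvSplitLoop_true (xs p t : List String) :
    pvSplitLoop xs p t true = (p.reverse, t.reverse ++ xs, true) := by
  induction xs generalizing t with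
  | nil => simp [pvSplitLoop]
  | cons l r ih => simp [pvSplitLoop, ih]

lemma pvSplitLoop_false (xs p t : List String) :
    pvSplitLoop xs p t false =
      match pvNsIdx xs with
      | some n => (p.reverse ++ xs.take n, t.reverse ++ xs.drop n, true)
      | none => (p.reverse ++ xs, t.reverse, false) := by
  induction xs generalizing p with
  | nil => simp [pvSplitLoop, pvNsIdx]
  | cons l r ih =>
    by_cases hp : pvP l = true
    · simp [pvSplitLoop, hp, pvSplitLoop_true, pvNsIdx]
    · have hp' : pvP l = false := by simpa using hp
      simp only [pvSplitLoop, hp', Bool.not_false, Bool.true_and, Bool.false_eq_true,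
        if_false, if_neg (by simp : ¬ (false = true))]
      rw [ih]
      simp only [pvNsIdx, hp', Bool.false_eq_true, if_false]
      cases hr : pvNsIdx r with
      | none => simp
      | some n => simp

-- backward walk characterizations
lemma pvRevLoop_true (xs acc : List String) :
    pvRevLoop xs acc true = (xs.reverse ++ acc, true) := by
  induction xs generalizing acc with
  | nil => simp [pvRevLoop]
  | cons l r ih => simp [pvRevLoop, ih]

lemma pvRevLoop_noU (xs acc : List String) (h : xs.all (fun x => !pvU x) = true) :
    pvRevLoop xs acc false = (xs.reverse ++ acc, false) := by
  induction xs generalizing acc with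
  | nil => simp [pvRevLoop]
  | cons l r ih =>
    simp only [List.all_cons, Bool.and_eq_true] at h
    have h1 : pvU l = false := by simpa using h.1
    simp [pvRevLoop, h1, ih (l :: acc) h.2]

lemma pvRevLoop_split (r1 : List String) (l : String) (r2 acc : List String)
    (h : r1.all (fun x => !pvU x) = true) (hU : pvU l = true) :
    pvRevLoop (r1 ++ l :: r2) acc false =
      (r2.reverse ++ l :: "using Shouldly;" :: r1.reverse ++ acc, true) := by
  induction r1 generalizing acc with
  | nil =>
    simp [pvRevLoop, hU, pvRevLoop_true]
  | cons a r ih =>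
    simp only [List.all_cons, Bool.and_eq_true] at h
    have h1 : pvU a = false := by simpa using h.1
    simp [pvRevLoop, h1, ih (a :: acc) h.2]

-- ===== VERDICT (by name: the statement is the Claim_ definition above) =====
theorem ensure_proper_using_shouldly_spec : Claim_equal_ensure_proper_using_shouldly := by
  unfold Claim_equal_ensure_proper_using_shouldly
  intro content _
  unfold Spec_ensure_proper_using_shouldly
  unfold ensure_proper_using_shouldly ensure_proper_using_shouldly_alt
  cases hin : PySem.Str.isIn "using Shouldly;" content with
  | true => simp
  | false =>
    simp only [Bool.not_false, if_true, Bool.false_eq_true, if_false]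
    set lines := (PySem.Str.split? content "\n").getD [] with hl
    have hscan := pvScan_eq lines 0 none
    simp only [Nat.cast_zero, Nat.zero_add] at hscan
    rw [pvSplitLoop_false]
    cases hns : pvNsIdx lines with
    | none =>
      rw [hns] at hscan
      simp only [Option.getD, List.take_length] at hscan
      simp only [List.reverse_nil, List.nil_append, List.append_nil]
      cases hlu : pvLuIdx lines with
      | none =>
        rw [hlu] at hscan
        simp only [pvOInt] at hscan
        rw [hscan]
        rw [if_neg (by norm_num), if_neg (by norm_num), PySem.List.insert_zero]
        rw [pvRevLoop_noU _ _ (by rw [List.all_reverse]; simpa using pvLuIdx_none_all lines hlu)]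
        simp
      | some k =>
        rw [hlu] at hscan
        simp only [pvOInt] at hscan
        rw [hscan]
        obtain ⟨r1, l, r2, hx, hlen, hU, hall⟩ := pvLuIdx_decomp lines k hlu
        have hk : k + 1 ≤ lines.length := by rw [hx]; simp; omega
        rw [if_pos (by positivity)]
        rw [show ((k : Nat) : Int) + 1 = ((k + 1 : Nat) : Int) by push_cast; ring]
        rw [PySem.List.insert_natCast lines (k+1) _ hk]
        rw [show lines.reverse = r2.reverse ++ l :: r1.reverse by rw [hx]; simp]
        rw [pvRevLoop_split r2.reverse l r1.reverse []
          (by rw [List.all_reverse]; simpa using hall) hU]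
        simp only [List.reverse_reverse, if_pos rfl, List.append_nil]
        have htake : lines.take (k+1) = r1 ++ [l] := by
          rw [hx, ← hlen, show r1 ++ l :: r2 = (r1 ++ [l]) ++ r2 by simp,
            show r1.length + 1 = (r1 ++ [l]).length by simp, List.take_left]
        have hdrop : lines.drop (k+1) = r2 := by
          rw [hx, ← hlen, show r1 ++ l :: r2 = (r1 ++ [l]) ++ r2 by simp,
            show r1.length + 1 = (r1 ++ [l]).length by simp, List.drop_left]
        rw [htake, hdrop]
        simp
    | some n =>
      have hnlt := pvNsIdx_lt lines n hns
      rw [hns] at hscan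
      simp only [Option.getD] at hscan
      have htn : (lines.take n).length = n := by simp; omega
      simp only [List.reverse_nil, List.nil_append]
      cases hlu : pvLuIdx (lines.take n) with
      | none =>
        rw [hlu] at hscan
        simp only [pvOInt] at hscan
        rw [hscan]
        rw [if_neg (by norm_num), if_pos (by positivity)]
        rw [PySem.List.insert_natCast lines n _ (by omega)]
        rw [show ((n : Nat) : Int) + 1 = ((n + 1 : Nat) : Int) by push_cast; ring]
        rw [PySem.List.insert_natCast _ (n+1) _ (by simp; omega)]
        rw [show lines.take n ++ "" :: lines.drop n = (lines.take n ++ [""]) ++ lines.drop n by simp]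
        rw [List.take_left' (by simp [htn]), List.drop_left' (by simp [htn])]
        rw [pvRevLoop_noU _ _ (by rw [List.all_reverse]; simpa using pvLuIdx_none_all _ hlu)]
        simp
      | some k =>
        rw [hlu] at hscan
        simp only [pvOInt] at hscan
        rw [hscan]
        obtain ⟨r1, l, r2, hx, hlen, hU, hall⟩ := pvLuIdx_decomp (lines.take n) k hlu
        have hkn : k + 1 ≤ n := by
          have h' : (lines.take n).length = r1.length + 1 + r2.length := by
            rw [hx]; simp; omega
          omega
        rw [if_pos (by positivity)]
        rw [show ((k : Nat) : Int) + 1 = ((k + 1 : Nat) : Int) by push_cast; ring]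
        rw [PySem.List.insert_natCast lines (k+1) _ (by omega)]
        rw [show (lines.take n).reverse = r2.reverse ++ l :: r1.reverse by rw [hx]; simp]
        rw [pvRevLoop_split r2.reverse l r1.reverse []
          (by rw [List.all_reverse]; simpa using hall) hU]
        simp only [List.reverse_reverse, if_pos rfl, List.append_nil]
        have h1 : lines.take (k+1) = r1 ++ [l] := by
          rw [show lines.take (k+1) = (lines.take n).take (k+1) by
                rw [List.take_take]; congr 1; omega]
          rw [hx, ← hlen, show r1 ++ l :: r2 = (r1 ++ [l]) ++ r2 by simp,
            show r1.length + 1 = (r1 ++ [l]).length by simp, List.take_left]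
        have h2 : lines.drop (k+1) = r2 ++ lines.drop n := by
          conv_lhs => rw [← List.take_append_drop n lines]
          rw [List.drop_append_of_le_length (by omega)]
          rw [hx, ← hlen, show r1 ++ l :: r2 = (r1 ++ [l]) ++ r2 by simp,
            show r1.length + 1 = (r1 ++ [l]).length by simp, List.drop_left]
        rw [h1, h2]
        simp
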